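-- pv_equiv track=rewrite | github.com/jKaleba/WDI | Z6/Z6.py | ex22Passage
-- ===== SOURCE A (Python) =====
-- from math import isqrt, log, sqrt
--
-- def prime(n: int):
--     if n < 2:
--         return False
--
--     if n == 2:
--         return True
--
--     if n % 2 == 0:
--         return False
--
--     for i in range(3, isqrt(n) + 1, 2):
--
--         if n % i == 0:
--             return False
--
--     return True
--
-- def ex22Passage(data: list, index=0, jumps=0) -> int:
--     if index == len(data) - 1:
--         return jumps
--
--     if index >= len(data):
--         return -1
--
--     temporary: int
--     for i in range(data[index], 1, -1):
--
--         if data[index] % i == 0: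
--             if prime(i):
--                 temporary = ex22Passage(data, index + i, jumps + 1)
--                 if temporary != -1:
--                     return temporary
--
--     return -1
-- ===== SOURCE B (Python) =====
-- def _primes_desc(v):
--     """Distinct prime divisors of v in descending order, by trial factorization."""
--     if v < 2:
--         return []
--     ps = []
--     m = v
--     if m % 2 == 0:
--         ps.append(2)
--         while m % 2 == 0:
--             m //= 2
--     d = 3
--     while d * d <= m:
--         if m % d == 0:
--             ps.append(d)
--             while m % d == 0:
--                 m //= d
--         d += 2
--     if m > 1:
--         ps.append(m)
--     ps.reverse()
--     return ps
--
-- def ex22Passage(data: list, index=0, jumps=0) -> int: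
--     if index == len(data) - 1:
--         return jumps
--
--     if index >= len(data):
--         return -1
--
--     for p in _primes_desc(data[index]):
--         temporary = ex22Passage(data, index + p, jumps + 1)
--         if temporary != -1:
--             return temporary
--
--     return -1
-- ===== Notes on version B (the rewrite author's own statement) =====
-- stated objective: alternative
-- what changed: Instead of scanning every i from data[index] down to 2 and running a trial-division primality test on each divisor, B factorizes data[index] once by trial division into its distinct prime divisors (descending) and recurses only on those.
import Mathlib
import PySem

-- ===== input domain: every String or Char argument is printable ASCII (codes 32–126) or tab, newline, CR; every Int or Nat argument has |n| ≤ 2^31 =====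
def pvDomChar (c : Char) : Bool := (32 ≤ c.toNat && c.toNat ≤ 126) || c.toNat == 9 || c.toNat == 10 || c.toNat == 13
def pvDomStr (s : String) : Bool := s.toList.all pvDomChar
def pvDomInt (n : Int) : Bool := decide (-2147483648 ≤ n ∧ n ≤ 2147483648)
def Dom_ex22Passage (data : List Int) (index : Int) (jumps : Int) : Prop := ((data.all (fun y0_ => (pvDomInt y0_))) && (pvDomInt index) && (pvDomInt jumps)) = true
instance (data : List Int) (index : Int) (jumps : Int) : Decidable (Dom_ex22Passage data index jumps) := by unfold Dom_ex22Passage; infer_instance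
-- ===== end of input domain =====

-- B replaces A's per-node scan of every i from data[index] down to 2 (each with a trial-division
-- primality test) by one trial factorization of data[index] into its distinct prime divisors,
-- visited in the same descending order: a different per-node algorithm with the same result.

-- ===== PORT A =====
-- prime(n) of A: trial division by 2 and by odd i in range(3, isqrt(n)+1, 2)
def pvPrimeA (n : Int) : Bool :=
  if n < 2 then false
  else if n == 2 then true
  else if PySem.Int.mod n 2 == 0 then false
  else if (PySem.List.pyRange 3 ((Nat.sqrt n.toNat : Int) + 1) 2).any
            (fun i => PySem.Int.mod n i == 0) then false
  else true

-- the 'for i in range(data[index], 1, -1)' loop with its early return (-1 if it falls through)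
def pvLoopA (step : Int → Int) (v : Int) : List Int → Int
  | [] => -1
  | i :: rest =>
    if PySem.Int.mod v i == 0 && pvPrimeA i then
      let t := step i
      if t ≠ -1 then t else pvLoopA step v rest
    else pvLoopA step v rest

-- A's recursion, fueled (fuel only makes the recursion structural; data.length + 1 never runs out:
-- each nested call strictly increases index by ≥ 2 and recursion stops once index ≥ len(data) - 1)
def pvGoA (data : List Int) : Nat → Int → Int → Int
  | 0, _, _ => -1
  | fuel+1, index, jumps =>
    if index = (data.length : Int) - 1 then jumps
    else if (data.length : Int) ≤ index then -1
    else
      let v := (PySem.List.pyGet? data index).getD 0   -- in range for every input admitted by Pre_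
      pvLoopA (fun i => pvGoA data fuel (index + i) (jumps + 1)) v (PySem.List.pyRange v 1 (-1))

def ex22Passage (data : List Int) (index : Int) (jumps : Int) : Int :=
  pvGoA data (data.length + 1) index jumps

-- ===== PORT B =====
-- 'while m % d == 0: m //= d'  (values are nonnegative throughout, so Nat division is exact here)
def pvDivOut (d m : Nat) : Nat :=
  if h : 2 ≤ d ∧ 0 < m ∧ m % d = 0 then pvDivOut d (m / d) else m
termination_by m
decreasing_by exact Nat.div_lt_self h.2.1 (by omega)

theorem pvDivOut_le (d m : Nat) : pvDivOut d m ≤ m := by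
  unfold pvDivOut
  split
  · rename_i h
    exact le_trans (pvDivOut_le d (m / d)) (Nat.div_le_self m d)
  · exact le_rfl
termination_by m
decreasing_by exact Nat.div_lt_self (by omega) (by omega)

-- the 'd = 3; while d * d <= m: …; d += 2' loop collecting ascending distinct odd prime factors
def pvOddLoop (d m : Nat) (acc : List Nat) : List Nat :=
  if d * d ≤ m then
    if m % d = 0 then pvOddLoop (d + 2) (pvDivOut d m) (acc ++ [d])
    else pvOddLoop (d + 2) m acc
  else if 1 < m then acc ++ [m] else acc
termination_by m + 2 - d
decreasing_by
  · have h1 := pvDivOut_le d m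
    rename_i hdd _
    have hdm : d ≤ m := by
      rcases Nat.eq_zero_or_pos d with h | h
      · omega
      · exact le_trans (Nat.le_mul_of_pos_left d h) hdd
    omega
  · rename_i hdd _
    have hdm : d ≤ m := by
      rcases Nat.eq_zero_or_pos d with h | h
      · omega
      · exact le_trans (Nat.le_mul_of_pos_left d h) hdd
    omega

-- _primes_desc(v) of B
def pvPrimesDesc (v : Int) : List Int :=
  if v < 2 then []
  else
    let n := v.toNat
    let ps : List Nat := if n % 2 = 0 then [2] else []
    let m : Nat := if n % 2 = 0 then pvDivOut 2 n else n
    ((pvOddLoop 3 m ps).reverse.map (fun p : Nat => (p : Int)))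

-- 'for p in _primes_desc(data[index]): …' with its early return
def pvLoopB (step : Int → Int) : List Int → Int
  | [] => -1
  | p :: rest =>
    let t := step p
    if t ≠ -1 then t else pvLoopB step rest

def pvGoB (data : List Int) : Nat → Int → Int → Int
  | 0, _, _ => -1
  | fuel+1, index, jumps =>
    if index = (data.length : Int) - 1 then jumps
    else if (data.length : Int) ≤ index then -1
    else pvLoopB (fun p => pvGoB data fuel (index + p) (jumps + 1))
           (pvPrimesDesc ((PySem.List.pyGet? data index).getD 0))

def ex22Passage_alt (data : List Int) (index : Int) (jumps : Int) : Int :=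
  pvGoB data (data.length + 1) index jumps

-- ===== PRECONDITION & SPEC =====
-- Pre_ excludes exactly the inputs on which A raises IndexError: index < -len(data) (and, for
-- empty data, index ≤ -2), where data[index] is evaluated out of range.
def Pre_ex22Passage (data : List Int) (index : Int) (jumps : Int) : Prop :=
  -(data.length : Int) ≤ index ∨ index = (data.length : Int) - 1

instance (data : List Int) (index : Int) (jumps : Int) : Decidable (Pre_ex22Passage data index jumps) := by
  unfold Pre_ex22Passage; infer_instance

def pvWitness_ex22Passage : List Int × Int × Int := ([4, 7, 2], 0, 0)

def Spec_ex22Passage (data : List Int) (index : Int) (jumps : Int) (out : Int) : Prop := out = ex22Passage_alt data index jumps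
instance (data : List Int) (index : Int) (jumps : Int) (out : Int) : Decidable (Spec_ex22Passage data index jumps out) := by unfold Spec_ex22Passage; infer_instance

-- ===== CLAIM (what is proved, stated in full; the proofs are below) =====
def Claim_equal_ex22Passage : Prop := ∀ (data : List Int) (index : Int) (jumps : Int), Dom_ex22Passage data index jumps → Pre_ex22Passage data index jumps → Spec_ex22Passage data index jumps (ex22Passage data index jumps)

-- ===== LEMMAS AND PROOFS =====

-- ---- correctness of A's prime test ----
theorem pvPrimeA_iff (n : Int) (h2 : 2 ≤ n) : pvPrimeA n = true ↔ Nat.Prime n.toNat := by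
  unfold pvPrimeA
  rw [if_neg (by omega)]
  by_cases hn2 : n = 2
  · subst hn2
    norm_num
    exact Nat.prime_two
  · rw [if_neg (by simp [hn2])]
    have hN3 : 3 ≤ n.toNat := by omega
    have hNn : ((n.toNat : Nat) : Int) = n := Int.toNat_of_nonneg (by omega)
    by_cases he : PySem.Int.mod n 2 == 0
    · rw [if_pos he]
      simp only [Bool.false_eq_true, false_iff]
      intro hP
      have hdvd : (2 : Int) ∣ n := (PySem.Int.mod_eq_zero_iff_dvd n 2).mp (by simpa using he)
      have h2N : (2 : Nat) ∣ n.toNat := by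
        have : ((2 : Nat) : Int) ∣ ((n.toNat : Nat) : Int) := by rw [hNn]; exact_mod_cast hdvd
        exact_mod_cast this
      have := hP.eq_one_or_self_of_dvd 2 h2N
      omega
    · rw [if_neg he]
      have hodd : ¬ (2 : Int) ∣ n := fun h =>
        he (by rw [beq_iff_eq]; exact (PySem.Int.mod_eq_zero_iff_dvd n 2).mpr h)
      by_cases hany : (PySem.List.pyRange 3 ((Nat.sqrt n.toNat : Int) + 1) 2).any
          (fun i => PySem.Int.mod n i == 0)
      · rw [if_pos hany]
        simp only [Bool.false_eq_true, false_iff]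
        intro hP
        rw [List.any_eq_true] at hany
        obtain ⟨i, hi, hmod⟩ := hany
        rw [PySem.List.mem_pyRange_iff_of_pos (by norm_num)] at hi
        obtain ⟨hi3, hilt, _⟩ := hi
        have hdvd : i ∣ n := (PySem.Int.mod_eq_zero_iff_dvd n i).mp (by simpa using hmod)
        have hiN : i.toNat ∣ n.toNat := by
          have h1 : ((i.toNat : Nat) : Int) = i := Int.toNat_of_nonneg (by omega)
          have : ((i.toNat : Nat) : Int) ∣ ((n.toNat : Nat) : Int) := by
            rw [h1, hNn]; exact hdvd
          exact_mod_cast this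
        have hsq : i.toNat ≤ Nat.sqrt n.toNat := by omega
        exact (Nat.prime_def_le_sqrt.mp hP).2 i.toNat (by omega) hsq hiN
      · rw [if_neg hany]
        refine ⟨fun _ => ?_, fun _ => rfl⟩
        rw [Nat.prime_def_le_sqrt]
        refine ⟨by omega, fun k hk2 hks hkdvd => ?_⟩
        apply hany
        rw [List.any_eq_true]
        have hkodd : k % 2 = 1 := by
          rcases Nat.even_or_odd k with hk | hk
          · exfalso
            obtain ⟨t, ht⟩ := hk
            have h2k : (2 : Nat) ∣ k := ⟨t, by omega⟩
            have h2N : (2 : Nat) ∣ n.toNat := h2k.trans hkdvd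
            exact hodd (by rw [← hNn]; exact_mod_cast h2N)
          · exact Nat.odd_iff.mp hk
        refine ⟨(k : Int), ?_, ?_⟩
        · rw [PySem.List.mem_pyRange_iff_of_pos (by norm_num)]
          refine ⟨by exact_mod_cast (show 3 ≤ k by omega), by omega, by omega⟩
        · rw [beq_iff_eq, PySem.Int.mod_eq_zero_iff_dvd]
          rw [← hNn]
          exact_mod_cast hkdvd

-- ---- pvDivOut: divides out all factors d ----
theorem pvDivOut_pos (d m : Nat) (hm : 0 < m) : 0 < pvDivOut d m := by
  unfold pvDivOut
  split
  · rename_i h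
    exact pvDivOut_pos d (m / d)
      (Nat.div_pos (Nat.le_of_dvd h.2.1 (Nat.dvd_of_mod_eq_zero h.2.2)) (by omega))
  · exact hm
termination_by m
decreasing_by exact Nat.div_lt_self (by omega) (by omega)

theorem pvDivOut_dvd (d m : Nat) : pvDivOut d m ∣ m := by
  unfold pvDivOut
  split
  · rename_i h
    exact dvd_trans (pvDivOut_dvd d (m / d)) (Nat.div_dvd_of_dvd (Nat.dvd_of_mod_eq_zero h.2.2))
  · exact dvd_rfl
termination_by m
decreasing_by exact Nat.div_lt_self (by omega) (by omega)

theorem pvDivOut_not_dvd (d m : Nat) (hd : 2 ≤ d) (hm : 0 < m) : ¬ d ∣ pvDivOut d m := by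
  unfold pvDivOut
  split
  · rename_i h
    exact pvDivOut_not_dvd d (m / d) hd
      (Nat.div_pos (Nat.le_of_dvd h.2.1 (Nat.dvd_of_mod_eq_zero h.2.2)) (by omega))
  · rename_i h
    intro hdvd
    exact h ⟨hd, hm, Nat.mod_eq_zero_of_dvd hdvd⟩
termination_by m
decreasing_by exact Nat.div_lt_self (by omega) (by omega)

theorem dvd_pvDivOut (d m q : Nat) (hq : Nat.Prime q) (hqm : q ∣ m) (hqd : ¬ q ∣ d) :
    q ∣ pvDivOut d m := by
  unfold pvDivOut
  split
  · rename_i h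
    have hdm : d ∣ m := Nat.dvd_of_mod_eq_zero h.2.2
    have hmul : q ∣ d * (m / d) := by rwa [Nat.mul_div_cancel' hdm]
    exact dvd_pvDivOut d (m / d) q hq ((hq.dvd_mul.mp hmul).resolve_left hqd) hqd
  · exact hqm
termination_by m
decreasing_by exact Nat.div_lt_self (by omega) (by omega)

-- ---- pvOddLoop: collects exactly the remaining prime factors, ascending ----
theorem pvOddLoop_spec (d m : Nat) (acc : List Nat)
    (hm : 0 < m) (hd : 3 ≤ d) (hodd : d % 2 = 1)
    (hfac : ∀ q, Nat.Prime q → q ∣ m → d ≤ q)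
    (hacc : ∀ a ∈ acc, a < d) (hap : acc.Pairwise (· < ·)) :
    (pvOddLoop d m acc).Pairwise (· < ·) ∧
      ∀ p, (p ∈ pvOddLoop d m acc ↔ p ∈ acc ∨ (Nat.Prime p ∧ p ∣ m)) := by
  rw [pvOddLoop]
  by_cases hdd : d * d ≤ m
  · rw [if_pos hdd]
    by_cases hmod : m % d = 0
    · rw [if_pos hmod]
      have hdvd : d ∣ m := Nat.dvd_of_mod_eq_zero hmod
      have hdprime : Nat.Prime d := by
        rcases Nat.exists_prime_and_dvd (show d ≠ 1 by omega) with ⟨q, hqp, hqd⟩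
        have hdq : d ≤ q := hfac q hqp (hqd.trans hdvd)
        have hqd' : q ≤ d := Nat.le_of_dvd (by omega) hqd
        have : q = d := le_antisymm hqd' hdq
        rwa [← this]
      have hm' : 0 < pvDivOut d m := pvDivOut_pos d m hm
      have hnd : ¬ d ∣ pvDivOut d m := pvDivOut_not_dvd d m (by omega) hm
      have hfac' : ∀ q, Nat.Prime q → q ∣ pvDivOut d m → d + 2 ≤ q := by
        intro q hqp hqm'
        have hqm : q ∣ m := hqm'.trans (pvDivOut_dvd d m)
        have h1 : d ≤ q := hfac q hqp hqm
        have hne : q ≠ d := fun he => hnd (he ▸ hqm')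
        have hne1 : q ≠ d + 1 := by
          intro he
          have h2 : 2 ∣ q := Nat.dvd_of_mod_eq_zero (by omega)
          have : q = 2 := ((hqp.eq_one_or_self_of_dvd 2 h2).resolve_left (by omega)).symm
          omega
        omega
      have hacc' : ∀ a ∈ acc ++ [d], a < d + 2 := by
        intro a ha
        rcases List.mem_append.mp ha with h | h
        · have := hacc a h; omega
        · simp at h; omega
      have hap' : (acc ++ [d]).Pairwise (· < ·) := by
        rw [List.pairwise_append]
        refine ⟨hap, List.pairwise_singleton _ _, fun a ha b hb => ?_⟩
        simp at hb
        have := hacc a ha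
        omega
      have IH := pvOddLoop_spec (d + 2) (pvDivOut d m) (acc ++ [d]) hm' (by omega) (by omega)
        hfac' hacc' hap'
      refine ⟨IH.1, fun p => ?_⟩
      rw [IH.2 p]
      constructor
      · rintro (hp | ⟨hp1, hp2⟩)
        · rcases List.mem_append.mp hp with h | h
          · exact Or.inl h
          · simp at h; exact Or.inr ⟨h ▸ hdprime, h ▸ hdvd⟩
        · exact Or.inr ⟨hp1, hp2.trans (pvDivOut_dvd d m)⟩
      · rintro (hp | ⟨hp1, hp2⟩)
        · exact Or.inl (List.mem_append.mpr (Or.inl hp))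
        · by_cases hpd : p = d
          · exact Or.inl (List.mem_append.mpr (Or.inr (by simp [hpd])))
          · refine Or.inr ⟨hp1, dvd_pvDivOut d m p hp1 hp2 ?_⟩
            intro hdvd'
            exact hpd ((Nat.prime_dvd_prime_iff_eq hp1 hdprime).mp hdvd')
    · rw [if_neg hmod]
      have hnd : ¬ d ∣ m := fun h => hmod (Nat.mod_eq_zero_of_dvd h)
      have hfac' : ∀ q, Nat.Prime q → q ∣ m → d + 2 ≤ q := by
        intro q hqp hqm
        have h1 : d ≤ q := hfac q hqp hqm
        have hne : q ≠ d := fun he => hnd (he ▸ hqm)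
        have hne1 : q ≠ d + 1 := by
          intro he
          have h2 : 2 ∣ q := Nat.dvd_of_mod_eq_zero (by omega)
          have : q = 2 := ((hqp.eq_one_or_self_of_dvd 2 h2).resolve_left (by omega)).symm
          omega
        omega
      exact pvOddLoop_spec (d + 2) m acc hm (by omega) (by omega) hfac'
        (fun a ha => by have := hacc a ha; omega) hap
  · rw [if_neg hdd]
    by_cases hm1 : 1 < m
    · rw [if_pos hm1]
      have hmprime : Nat.Prime m := by
        rw [Nat.prime_def_le_sqrt]
        refine ⟨by omega, fun k hk2 hks hkdvd => ?_⟩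
        rcases Nat.exists_prime_and_dvd (show k ≠ 1 by omega) with ⟨q, hqp, hqk⟩
        have hqm : q ∣ m := hqk.trans hkdvd
        have hdq : d ≤ q := hfac q hqp hqm
        have hqk' : q ≤ k := Nat.le_of_dvd (by omega) hqk
        have hsq : q * q ≤ m :=
          le_trans (Nat.mul_le_mul (hqk'.trans hks) (hqk'.trans hks)) (Nat.sqrt_le m)
        have : d * d ≤ q * q := Nat.mul_le_mul hdq hdq
        omega
      have hdm : d ≤ m := hfac m hmprime dvd_rfl
      constructor
      · rw [List.pairwise_append]
        refine ⟨hap, List.pairwise_singleton _ _, fun a ha b hb => ?_⟩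
        simp at hb
        have := hacc a ha
        omega
      · intro p
        rw [List.mem_append]
        constructor
        · rintro (hp | hp)
          · exact Or.inl hp
          · simp at hp
            exact Or.inr ⟨hp ▸ hmprime, hp ▸ dvd_rfl⟩
        · rintro (hp | ⟨hp1, hp2⟩)
          · exact Or.inl hp
          · exact Or.inr (by simp [(Nat.prime_dvd_prime_iff_eq hp1 hmprime).mp hp2])
    · rw [if_neg hm1]
      refine ⟨hap, fun p => ?_⟩
      constructor
      · exact Or.inl
      · rintro (hp | ⟨hp1, hp2⟩)
        · exact hp
        · have : m = 1 := by omega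
          rw [this] at hp2
          exact absurd (Nat.eq_one_of_dvd_one hp2) hp1.ne_one
termination_by m + 2 - d
decreasing_by
  · have h1 := pvDivOut_le d m
    have hdm : d ≤ m := by
      rcases Nat.eq_zero_or_pos d with h | h
      · omega
      · exact le_trans (Nat.le_mul_of_pos_left d h) hdd
    omega
  · have hdm : d ≤ m := by
      rcases Nat.eq_zero_or_pos d with h | h
      · omega
      · exact le_trans (Nat.le_mul_of_pos_left d h) hdd
    omega

-- ---- pvPrimesDesc: strictly descending, membership = prime divisor of v ----
theorem pvStart_spec (n : Nat) (hn : 2 ≤ n) :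
    (pvOddLoop 3 (if n % 2 = 0 then pvDivOut 2 n else n)
        (if n % 2 = 0 then [2] else [])).Pairwise (· < ·) ∧
    ∀ p, (p ∈ pvOddLoop 3 (if n % 2 = 0 then pvDivOut 2 n else n)
        (if n % 2 = 0 then [2] else []) ↔ Nat.Prime p ∧ p ∣ n) := by
  by_cases h2 : n % 2 = 0
  · simp only [if_pos h2]
    have h2d : (2 : Nat) ∣ n := Nat.dvd_of_mod_eq_zero h2
    have hm0 : 0 < pvDivOut 2 n := pvDivOut_pos 2 n (by omega)
    have hnd : ¬ (2 : Nat) ∣ pvDivOut 2 n := pvDivOut_not_dvd 2 n le_rfl (by omega)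
    have hfac : ∀ q, Nat.Prime q → q ∣ pvDivOut 2 n → 3 ≤ q := by
      intro q hq hqd
      have := hq.two_le
      rcases Nat.lt_or_ge q 3 with h | h
      · have hq2 : q = 2 := by omega
        exact absurd (hq2 ▸ hqd) hnd
      · exact h
    have S := pvOddLoop_spec 3 (pvDivOut 2 n) [2] hm0 le_rfl rfl hfac
      (by intro a ha; simp at ha; omega) (List.pairwise_singleton _ _)
    refine ⟨S.1, fun p => ?_⟩
    rw [S.2 p]
    constructor
    · rintro (hp | ⟨hp1, hp2⟩)
      · simp at hp
        exact ⟨hp ▸ Nat.prime_two, hp ▸ h2d⟩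
      · exact ⟨hp1, hp2.trans (pvDivOut_dvd 2 n)⟩
    · rintro ⟨hp1, hp2⟩
      by_cases hp2' : p = 2
      · exact Or.inl (by simp [hp2'])
      · refine Or.inr ⟨hp1, dvd_pvDivOut 2 n p hp1 hp2 ?_⟩
        intro h
        exact hp2' ((Nat.prime_dvd_prime_iff_eq hp1 Nat.prime_two).mp h)
  · simp only [if_neg h2]
    have hfac : ∀ q, Nat.Prime q → q ∣ n → 3 ≤ q := by
      intro q hq hqd
      have := hq.two_le
      rcases Nat.lt_or_ge q 3 with h | h
      · have hq2 : q = 2 := by omega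
        exact absurd (Nat.mod_eq_zero_of_dvd (hq2 ▸ hqd)) h2
      · exact h
    have S := pvOddLoop_spec 3 n [] (by omega) le_rfl rfl hfac (by simp) (by simp)
    exact ⟨S.1, fun p => by rw [S.2 p]; simp⟩

theorem pvPrimesDesc_eq (v : Int) (hv : ¬ v < 2) :
    pvPrimesDesc v = ((pvOddLoop 3 (if v.toNat % 2 = 0 then pvDivOut 2 v.toNat else v.toNat)
      (if v.toNat % 2 = 0 then [2] else [])).reverse.map (fun p : Nat => (p : Int))) := by
  rw [pvPrimesDesc.eq_def, if_neg hv]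

theorem pvPrimesDesc_pairwise (v : Int) : (pvPrimesDesc v).Pairwise (· > ·) := by
  by_cases hv : v < 2
  · simp [pvPrimesDesc, hv]
  · rw [pvPrimesDesc_eq v hv]
    have S := (pvStart_spec v.toNat (by omega)).1
    have h1 := List.pairwise_reverse.mpr S
    exact List.Pairwise.map (fun p : Nat => (p : Int)) (fun a b h => by exact Int.ofNat_lt.mpr h) h1

theorem mem_pvPrimesDesc (v x : Int) :
    x ∈ pvPrimesDesc v ↔ 2 ≤ x ∧ x ≤ v ∧ x ∣ v ∧ Nat.Prime x.toNat := by
  by_cases hv : v < 2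
  · simp only [pvPrimesDesc, if_pos hv, List.not_mem_nil, false_iff]
    rintro ⟨h1, h2, _⟩
    omega
  · have S := (pvStart_spec v.toNat (by omega)).2
    have hvn : ((v.toNat : Nat) : Int) = v := Int.toNat_of_nonneg (by omega)
    rw [pvPrimesDesc_eq v hv, List.mem_map]
    constructor
    · rintro ⟨p, hp, rfl⟩
      rw [List.mem_reverse] at hp
      obtain ⟨hp1, hp2⟩ := (S p).mp hp
      have hle : p ≤ v.toNat := Nat.le_of_dvd (by omega) hp2
      refine ⟨by exact_mod_cast hp1.two_le, by omega, ?_, by simpa using hp1⟩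
      rw [← hvn]
      exact_mod_cast hp2
    · rintro ⟨h1, h2, h3, h4⟩
      refine ⟨x.toNat, List.mem_reverse.mpr ((S x.toNat).mpr ⟨h4, ?_⟩), Int.toNat_of_nonneg (by omega)⟩
      have hx : ((x.toNat : Nat) : Int) = x := Int.toNat_of_nonneg (by omega)
      have : ((x.toNat : Nat) : Int) ∣ ((v.toNat : Nat) : Int) := by rw [hx, hvn]; exact h3
      exact_mod_cast this

-- ---- the filtered countdown range equals pvPrimesDesc ----
theorem pvFilter_eq (v : Int) :
    (PySem.List.pyRange v 1 (-1)).filter (fun i => PySem.Int.mod v i == 0 && pvPrimeA i)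
      = pvPrimesDesc v := by
  by_cases hv : v < 2
  · rw [PySem.List.pyRange_neg_one_eq_nil (by omega)]
    simp [pvPrimesDesc, hv]
  · have hL : ((PySem.List.pyRange v 1 (-1)).filter
        (fun i => PySem.Int.mod v i == 0 && pvPrimeA i)).Pairwise (· > ·) := by
      apply List.Pairwise.filter
      rw [PySem.List.pyRange_neg_one_eq_reverse]
      exact List.pairwise_reverse.mpr (PySem.List.pairwise_lt_pyRange_one 2 (v + 1))
    have hR := pvPrimesDesc_pairwise v
    have hmem : ∀ x, (x ∈ (PySem.List.pyRange v 1 (-1)).filter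
        (fun i => PySem.Int.mod v i == 0 && pvPrimeA i) ↔ x ∈ pvPrimesDesc v) := by
      intro x
      rw [List.mem_filter, PySem.List.mem_pyRange_neg_one, mem_pvPrimesDesc]
      constructor
      · rintro ⟨⟨hx1, hx2⟩, hpred⟩
        rw [Bool.and_eq_true, beq_iff_eq] at hpred
        have hdvd : x ∣ v := (PySem.Int.mod_eq_zero_iff_dvd v x).mp hpred.1
        have hx2' : (2 : Int) ≤ x := by omega
        exact ⟨hx2', hx2, hdvd, (pvPrimeA_iff x hx2').mp hpred.2⟩
      · rintro ⟨h1, h2, h3, h4⟩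
        refine ⟨⟨by omega, h2⟩, ?_⟩
        rw [Bool.and_eq_true, beq_iff_eq]
        exact ⟨(PySem.Int.mod_eq_zero_iff_dvd v x).mpr h3, (pvPrimeA_iff x h1).mpr h4⟩
    exact List.eq_of_perm_of_sorted (fun a b _ _ hab hba => by omega) hL hR
      ((List.perm_ext_iff_of_nodup (hL.imp (fun h => by omega))
        (hR.imp (fun h => by omega))).mpr hmem)

-- ---- loop correspondences ----
theorem pvLoopA_eq (step : Int → Int) (v : Int) (l : List Int) :
    pvLoopA step v l = pvLoopB step (l.filter (fun i => PySem.Int.mod v i == 0 && pvPrimeA i)) := by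
  induction l with
  | nil => rfl
  | cons i rest ih =>
    simp only [pvLoopA, List.filter_cons]
    by_cases h : (PySem.Int.mod v i == 0 && pvPrimeA i) = true
    · simp [h, pvLoopB, ih]
    · simp [h, ih]

theorem pvLoopB_congr (step step' : Int → Int) (l : List Int)
    (h : ∀ p ∈ l, step p = step' p) : pvLoopB step l = pvLoopB step' l := by
  induction l with
  | nil => rfl
  | cons p rest ih =>
    simp only [pvLoopB, h p (by simp)]
    exact congrArg _ (ih fun q hq => h q (by simp [hq]))

-- ---- main recursion equality ----
theorem pvGo_eq (data : List Int) (fuel : Nat) :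
    ∀ index jumps, pvGoA data fuel index jumps = pvGoB data fuel index jumps := by
  induction fuel with
  | zero => intro index jumps; rfl
  | succ fuel ih =>
    intro index jumps
    simp only [pvGoA, pvGoB]
    split
    · rfl
    · split
      · rfl
      · rw [pvLoopA_eq, pvFilter_eq]
        exact pvLoopB_congr _ _ _ (fun p _ => ih (index + p) (jumps + 1))

-- ===== VERDICT (by name: the statement is the Claim_ definition above) =====
theorem ex22Passage_spec : Claim_equal_ex22Passage := by
  intro data index jumps _ _
  unfold Spec_ex22Passage ex22Passage ex22Passage_alt
  exact pvGo_eq data (data.length + 1) index jumps
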